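-- pv_equiv track=rewrite | github.com/datakaveri/k-anonymisation-SKALD | SKALD/generalization_rf.py | _merge_sparse_equivalence_classes
-- ===== SOURCE A (Python) =====
-- from typing import List, Dict, Tuple, Optional
--
-- def _merge_sparse_equivalence_classes(
--     histogram: Dict[Tuple[int, ...], int],
--     sensitive_sets: Optional[Dict[Tuple[int, ...], set]],
--     node: List[int],
-- ) -> Tuple[Dict[Tuple[int, ...], int], Optional[Dict[Tuple[int, ...], set]]]:
--     merged_hist: Dict[Tuple[int, ...], int] = {}
--     merged_sets: Optional[Dict[Tuple[int, ...], set]] = {} if sensitive_sets is not None else None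
--
--     for idx, count in histogram.items():
--         merged_idx = tuple(
--             max(0, idx[i] // max(1, int(node[i]))) for i in range(len(idx))
--         )
--         merged_hist[merged_idx] = merged_hist.get(merged_idx, 0) + count
--         if merged_sets is not None and sensitive_sets is not None:
--             if idx in sensitive_sets:
--                 merged_sets.setdefault(merged_idx, set()).update(sensitive_sets[idx])
--
--     return merged_hist, merged_sets
-- ===== SOURCE B (Python) =====
-- from typing import List, Dict, Tuple, Optional
--
--
-- def _merge_sparse_equivalence_classes(
--     histogram: Dict[Tuple[int, ...], int],
--     sensitive_sets: Optional[Dict[Tuple[int, ...], set]],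
--     node: List[int],
-- ) -> Tuple[Dict[Tuple[int, ...], int], Optional[Dict[Tuple[int, ...], set]]]:
--     # Two-phase group-by: annotate every entry with its merged key, bucket the
--     # entries per merged key, then emit one output entry per distinct merged key
--     # (first-occurrence order) by aggregating its bucket.
--     triples = [
--         (
--             tuple(max(0, idx[i] // max(1, int(node[i]))) for i in range(len(idx))),
--             idx,
--             count,
--         )
--         for idx, count in histogram.items()
--     ]
--     groups: Dict[Tuple[int, ...], list] = {}
--     for m, idx, c in triples:
--         groups.setdefault(m, []).append((idx, c))
--     merged_hist = {m: sum(c for _, c in g) for m, g in groups.items()}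
--     if sensitive_sets is None:
--         return merged_hist, None
--     merged_sets: Dict[Tuple[int, ...], set] = {}
--     for m in dict.fromkeys(m for m, idx, _ in triples if idx in sensitive_sets):
--         acc: set = set()
--         for idx, _ in groups[m]:
--             if idx in sensitive_sets:
--                 acc.update(sensitive_sets[idx])
--         merged_sets[m] = acc
--     return merged_hist, merged_sets
-- ===== Notes on version B (the rewrite author's own statement) =====
-- stated objective: alternative
-- what changed: A aggregates in one pass with incremental dict get/insert and setdefault/update; B is a two-phase group-by: it first annotates every histogram entry with its merged key and buckets the entries per merged key, then builds each output dict by aggregating one bucket per distinct merged key (first-occurrence order).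
import Mathlib
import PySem

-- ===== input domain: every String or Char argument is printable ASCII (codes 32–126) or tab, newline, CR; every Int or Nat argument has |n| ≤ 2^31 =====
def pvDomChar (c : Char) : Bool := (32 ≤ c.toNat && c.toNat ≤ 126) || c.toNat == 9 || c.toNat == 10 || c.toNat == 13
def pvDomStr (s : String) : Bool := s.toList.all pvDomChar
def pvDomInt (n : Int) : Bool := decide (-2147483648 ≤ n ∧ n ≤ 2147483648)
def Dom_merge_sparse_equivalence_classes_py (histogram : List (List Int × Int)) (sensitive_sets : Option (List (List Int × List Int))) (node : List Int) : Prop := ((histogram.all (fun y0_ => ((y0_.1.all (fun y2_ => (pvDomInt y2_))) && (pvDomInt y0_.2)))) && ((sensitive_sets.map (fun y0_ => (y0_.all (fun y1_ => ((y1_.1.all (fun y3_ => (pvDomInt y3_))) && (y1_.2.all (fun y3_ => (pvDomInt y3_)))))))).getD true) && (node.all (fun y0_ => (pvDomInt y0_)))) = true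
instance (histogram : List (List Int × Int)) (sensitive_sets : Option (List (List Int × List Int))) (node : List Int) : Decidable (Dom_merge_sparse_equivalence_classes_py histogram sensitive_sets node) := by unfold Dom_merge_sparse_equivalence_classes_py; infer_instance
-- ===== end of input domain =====

-- B replaces A's one-pass dict aggregation by a two-phase group-by (annotate each entry with
-- its merged key, then emit one output entry per distinct merged key); objective: alternative
-- decomposition, not claimed faster.

-- ===== PORT A =====
-- shared subexpression of both Pythons: merged_idx = tuple(max(0, idx[i] // max(1, int(node[i]))) for i in range(len(idx)))
-- (node[i] ported with a default that never fires under Pre_, where i < len(idx) ≤ len(node); idx[i] is always in range)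
def pvMergedIdx (node : List Int) (idx : List Int) : List Int :=
  (PySem.List.pyRange 0 (idx.length : Int) 1).map
    (fun i => max 0 (PySem.Int.floordiv (PySem.List.pyGetD idx i 0)
                                        (max 1 (PySem.List.pyGetD node i 0))))

-- merged_hist[merged_idx] = merged_hist.get(merged_idx, 0) + count
def pvStepHist (node : List Int) (d : PySem.Dict (List Int) Int) (p : List Int × Int) :
    PySem.Dict (List Int) Int :=
  let m := pvMergedIdx node p.1
  d.insert m (d.getD m 0 + p.2)

-- if merged_sets is not None and sensitive_sets is not None:
--   if idx in sensitive_sets: merged_sets.setdefault(merged_idx, set()).update(sensitive_sets[idx])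
-- (setdefault(m, set()).update(s) overwrites in place / appends a new key — exactly Dict.insert)
def pvStepSets (sensitive_sets : Option (List (List Int × List Int))) (node : List Int)
    (b : Option (PySem.Dict (List Int) (List Int))) (p : List Int × Int) :
    Option (PySem.Dict (List Int) (List Int)) :=
  match b, sensitive_sets with
  | some msd, some ssl =>
      let m := pvMergedIdx node p.1
      if (PySem.Dict.mk ssl).contains p.1 then
        some (msd.insert m (PySem.Set.update (msd.getD m PySem.Set.empty)
                                             ((PySem.Dict.mk ssl).getD p.1 [])))
      else some msd
  | _, _ => b

def merge_sparse_equivalence_classes_py (histogram : List (List Int × Int)) (sensitive_sets : Option (List (List Int × List Int))) (node : List Int) : (List (List Int × Int)) × (Option (List (List Int × List Int))) :=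
  -- merged_hist = {}; merged_sets = {} if sensitive_sets is not None else None; then the loop
  let st := histogram.foldl
    (fun st p => (pvStepHist node st.1 p, pvStepSets sensitive_sets node st.2 p))
    ((PySem.Dict.empty : PySem.Dict (List Int) Int),
     match sensitive_sets with
     | some _ => some (PySem.Dict.empty : PySem.Dict (List Int) (List Int))
     | none => none)
  (st.1.items, st.2.map PySem.Dict.items)

-- ===== PORT B =====
def merge_sparse_equivalence_classes_py_alt (histogram : List (List Int × Int)) (sensitive_sets : Option (List (List Int × List Int))) (node : List Int) : (List (List Int × Int)) × (Option (List (List Int × List Int))) :=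
  -- triples = [(merged_key, idx, count) for idx, count in histogram.items()]
  let triples := histogram.map (fun p => (pvMergedIdx node p.1, p.1, p.2))
  -- groups = {}; for m, idx, c in triples: groups.setdefault(m, []).append((idx, c))
  let groups := triples.foldl
    (fun (g : PySem.Dict (List Int) (List (List Int × Int))) t =>
      g.modify t.1 [] (fun x => x ++ [t.2])) PySem.Dict.empty
  -- merged_hist = {m: sum(c for _, c in g) for m, g in groups.items()}
  let merged_hist := groups.items.map
    (fun mg => (mg.1, mg.2.foldl (fun a q => a + q.2) (0 : Int)))
  match sensitive_sets with
  | none => (merged_hist, none)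
  | some ssl =>
    -- for m in dict.fromkeys(m for m, idx, _ in triples if idx in sensitive_sets):
    --   acc = set(); for idx, _ in groups[m]: if idx in sensitive_sets: acc.update(…)
    let skeys := PySem.List.dedup
      ((triples.filter (fun t => (PySem.Dict.mk ssl).contains t.2.1)).map (·.1))
    let merged_sets := skeys.map (fun m =>
      (m, (groups.getD m []).foldl (fun acc q =>
            if (PySem.Dict.mk ssl).contains q.1 then
              PySem.Set.update acc ((PySem.Dict.mk ssl).getD q.1 [])
            else acc)
          PySem.Set.empty))
    (merged_hist, some merged_sets)

-- ===== PRECONDITION & SPEC =====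
-- Pre_ excludes exactly the inputs where Python A raises IndexError: some histogram key is
-- longer than node (node[i] out of range in the merged-key comprehension).
def Pre_merge_sparse_equivalence_classes_py (histogram : List (List Int × Int)) (sensitive_sets : Option (List (List Int × List Int))) (node : List Int) : Prop :=
  ∀ p ∈ histogram, p.1.length ≤ node.length
instance (histogram : List (List Int × Int)) (sensitive_sets : Option (List (List Int × List Int))) (node : List Int) : Decidable (Pre_merge_sparse_equivalence_classes_py histogram sensitive_sets node) := by unfold Pre_merge_sparse_equivalence_classes_py; infer_instance

def pvWitness_merge_sparse_equivalence_classes_py : (List (List Int × Int)) × (Option (List (List Int × List Int))) × List Int :=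
  ([([4, 1], 2), ([5, 1], 1)], some [([4, 1], [7, 2])], [3, 2])

def Spec_merge_sparse_equivalence_classes_py (histogram : List (List Int × Int)) (sensitive_sets : Option (List (List Int × List Int))) (node : List Int) (out : (List (List Int × Int)) × (Option (List (List Int × List Int)))) : Prop := out = merge_sparse_equivalence_classes_py_alt histogram sensitive_sets node
instance (histogram : List (List Int × Int)) (sensitive_sets : Option (List (List Int × List Int))) (node : List Int) (out : (List (List Int × Int)) × (Option (List (List Int × List Int)))) : Decidable (Spec_merge_sparse_equivalence_classes_py histogram sensitive_sets node out) := by unfold Spec_merge_sparse_equivalence_classes_py; infer_instance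

-- ===== CLAIM (what is proved, stated in full; the proofs are below) =====
def Claim_equal_merge_sparse_equivalence_classes_py : Prop := ∀ (histogram : List (List Int × Int)) (sensitive_sets : Option (List (List Int × List Int))) (node : List Int), Dom_merge_sparse_equivalence_classes_py histogram sensitive_sets node → Pre_merge_sparse_equivalence_classes_py histogram sensitive_sets node → Spec_merge_sparse_equivalence_classes_py histogram sensitive_sets node (merge_sparse_equivalence_classes_py histogram sensitive_sets node)

-- ===== LEMMAS AND PROOFS =====

-- a fold over a product whose components evolve independently splits
theorem pv_foldl_prod {α β γ : Type} (g : α → γ → α) (h : β → γ → β) (l : List γ) (a : α) (b : β) :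
    l.foldl (fun st p => (g st.1 p, h st.2 p)) (a, b) = (l.foldl g a, l.foldl h b) := by
  induction l generalizing a b with
  | nil => rfl
  | cons x l ih => simpa using ih (g a x) (h b x)

-- a fold threading `some` splits off the option
def pvOptStep {α γ : Type} (v : α → γ → α) : Option α → γ → Option α :=
  fun b p => match b with
    | some x => some (v x p)
    | none => none

theorem pv_foldl_some {α γ : Type} (v : α → γ → α) (l : List γ) (d : α) :
    l.foldl (pvOptStep v) (some d) = some (l.foldl v d) := by
  induction l generalizing d with
  | nil => rfl
  | cons x l ih => simpa [pvOptStep] using ih (v d x)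

-- lookup in an insert-with-combine loop: the group fold over entries whose key matches
theorem pv_getD_foldl_insert_group {β γ : Type} (f : β → γ → β) (e : β)
    (l : List (List Int × γ)) (d : PySem.Dict (List Int) β) (k : List Int) :
    (l.foldl (fun d p => d.insert p.1 (f (d.getD p.1 e) p.2)) d).getD k e
      = (l.filter (fun p => p.1 == k)).foldl (fun a p => f a p.2) (d.getD k e) := by
  induction l generalizing d with
  | nil => rfl
  | cons p l ih =>
    simp only [List.foldl_cons, List.filter_cons, ih, PySem.Dict.getD_insert]
    by_cases h : p.1 = k
    · simp [h]
    · simp [h, Ne.symm h]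

-- the items of an insert-with-combine loop from empty: one entry per distinct key,
-- in first-occurrence order, valued by the group fold
theorem pv_items_foldl_insert_group {β γ : Type} (f : β → γ → β) (e : β)
    (l : List (List Int × γ)) :
    (l.foldl (fun d p => d.insert p.1 (f (d.getD p.1 e) p.2)) (PySem.Dict.empty)).items
      = (PySem.List.dedup (l.map (·.1))).map
          (fun k => (k, (l.filter (fun p => p.1 == k)).foldl (fun a p => f a p.2) e)) := by
  have hnd : (l.foldl (fun d p => d.insert p.1 (f (d.getD p.1 e) p.2))
      (PySem.Dict.empty : PySem.Dict (List Int) β)).keys.Nodup :=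
    PySem.Dict.nodup_keys_foldl_insert_key l (·.1) (fun d x => f (d.getD x.1 e) x.2) _
      PySem.Dict.nodup_keys_empty
  rw [PySem.Dict.items_eq_map_keys _ hnd e,
      PySem.Dict.keys_foldl_insert_key l (·.1) (fun d x => f (d.getD x.1 e) x.2),
      PySem.Dict.keys_empty, PySem.Set.update_nil_left]
  simp [PySem.List.dedup_eq_ofList, pv_getD_foldl_insert_group]

-- A's histogram loop as an insert-with-combine loop over (merged key, count) pairs
theorem pv_hist_fold (node : List Int) (l : List (List Int × Int)) (d : PySem.Dict (List Int) Int) :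
    l.foldl (pvStepHist node) d
      = (l.map (fun p => (pvMergedIdx node p.1, p.2))).foldl
          (fun d q => d.insert q.1 (d.getD q.1 0 + q.2)) d := by
  induction l generalizing d with
  | nil => rfl
  | cons p l ih => simp [pvStepHist, ih]

-- A's sensitive-set branch on `some` as a dict-level step
def pvSetsStep (node : List Int) (ssl : List (List Int × List Int))
    (msd : PySem.Dict (List Int) (List Int)) (p : List Int × Int) :
    PySem.Dict (List Int) (List Int) :=
  if (PySem.Dict.mk ssl).contains p.1 then
    msd.insert (pvMergedIdx node p.1)
      (PySem.Set.update (msd.getD (pvMergedIdx node p.1) PySem.Set.empty)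
                        ((PySem.Dict.mk ssl).getD p.1 []))
  else msd

theorem pv_stepSets_some (node : List Int) (ssl : List (List Int × List Int)) :
    pvStepSets (some ssl) node = pvOptStep (pvSetsStep node ssl) := by
  funext b p
  cases b with
  | none => rfl
  | some x =>
    simp only [pvStepSets, pvSetsStep, pvOptStep]
    split_ifs <;> rfl

theorem pv_sets_fold (node : List Int) (ssl : List (List Int × List Int))
    (l : List (List Int × Int)) (d : PySem.Dict (List Int) (List Int)) :
    l.foldl (pvSetsStep node ssl) d
      = ((l.filter (fun p => (PySem.Dict.mk ssl).contains p.1)).map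
            (fun p => (pvMergedIdx node p.1, p.1))).foldl
          (fun d q => d.insert q.1 (PySem.Set.update (d.getD q.1 PySem.Set.empty)
                                                     ((PySem.Dict.mk ssl).getD q.2 []))) d := by
  induction l generalizing d with
  | nil => rfl
  | cons p l ih =>
    by_cases h : (ssl.any fun q => q.1 == p.1) = true <;>
      simp [pvSetsStep, PySem.Dict.contains_mk, h, ih]

-- A's behaviour when sensitive_sets is None: the set component is never touched
theorem pv_stepSets_none (node : List Int) : pvStepSets none node = fun b _ => b := by
  funext b p
  cases b <;> rfl

theorem pv_foldl_id {α γ : Type} (l : List γ) (b : α) :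
    l.foldl (fun b _ => b) b = b := by
  induction l <;> simp [*]

-- A's merged_hist items are exactly B's merged_hist
theorem pv_hist_items (node : List Int) (histogram : List (List Int × Int)) :
    (histogram.foldl (pvStepHist node) PySem.Dict.empty).items
      = (PySem.List.dedup ((histogram.map (fun p => (pvMergedIdx node p.1, p.1, p.2))).map (·.1))).map
          (fun m => (m, ((histogram.map (fun p => (pvMergedIdx node p.1, p.1, p.2))).filter
                            (fun t => t.1 == m)).foldl (fun a t => a + t.2.2) (0 : Int))) := by
  rw [pv_hist_fold, pv_items_foldl_insert_group]
  simp only [List.map_map, List.filter_map, List.foldl_map, Function.comp_def]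

-- A's merged_sets items (some case) are exactly B's merged_sets
theorem pv_sets_items (node : List Int) (ssl : List (List Int × List Int))
    (histogram : List (List Int × Int)) :
    (histogram.foldl (pvSetsStep node ssl) PySem.Dict.empty).items
      = (PySem.List.dedup (((histogram.map (fun p => (pvMergedIdx node p.1, p.1, p.2))).filter
              (fun t => (PySem.Dict.mk ssl).contains t.2.1)).map (·.1))).map
          (fun m => (m, (histogram.map (fun p => (pvMergedIdx node p.1, p.1, p.2))).foldl
              (fun acc t =>
                if t.1 == m && (PySem.Dict.mk ssl).contains t.2.1 then
                  PySem.Set.update acc ((PySem.Dict.mk ssl).getD t.2.1 [])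
                else acc)
              PySem.Set.empty)) := by
  rw [pv_sets_fold,
      pv_items_foldl_insert_group (fun a i => PySem.Set.update a ((PySem.Dict.mk ssl).getD i []))
        PySem.Set.empty]
  simp only [List.map_map, List.filter_map, List.filter_filter, List.foldl_map,
    List.foldl_filter, Function.comp_def]

-- B's groups index: one bucket per distinct merged key, in first-occurrence order
theorem pv_groups_items (l : List (List Int × List Int × Int)) :
    (l.foldl (fun (g : PySem.Dict (List Int) (List (List Int × Int))) t =>
        g.modify t.1 [] (fun x => x ++ [t.2])) PySem.Dict.empty).items
      = (PySem.List.dedup (l.map (·.1))).map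
          (fun k => (k, (l.filter (fun t => t.1 == k)).map (·.2))) := by
  have hnd : ((l.foldl (fun (g : PySem.Dict (List Int) (List (List Int × Int))) t =>
      g.modify t.1 [] (fun x => x ++ [t.2])) PySem.Dict.empty)).keys.Nodup :=
    PySem.Dict.nodup_keys_foldl_modify_key l (·.1) [] (fun _ t v => v ++ [t.2]) _
      PySem.Dict.nodup_keys_empty
  rw [PySem.Dict.items_eq_map_keys _ hnd [],
      PySem.Dict.keys_foldl_modify_key l (·.1) [] (fun _ t v => v ++ [t.2]),
      PySem.Dict.keys_empty, PySem.Set.update_nil_left]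
  simp [PySem.List.dedup_eq_ofList, PySem.Dict.getD_foldl_modify_append]

-- nested if-filters merge into a conjunction
theorem pv_foldl_if_if {α β : Type} (c1 c2 : β → Bool) (f : α → β → α) (l : List β) (a : α) :
    l.foldl (fun a p => if c1 p then (if c2 p then f a p else a) else a) a
      = l.foldl (fun a p => if c1 p && c2 p then f a p else a) a := by
  induction l generalizing a with
  | nil => rfl
  | cons x l ih =>
    simp only [List.foldl_cons]
    by_cases h1 : c1 x <;> by_cases h2 : c2 x <;> simp [h1, h2, ih]

-- aggregating one bucket of the groups index = the single filtered fold over all triples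
theorem pv_sets_value (ssl : List (List Int × List Int)) (l : List (List Int × List Int × Int))
    (k : List Int) :
    ((l.foldl (fun (g : PySem.Dict (List Int) (List (List Int × Int))) t =>
          g.modify t.1 [] (fun x => x ++ [t.2])) PySem.Dict.empty).getD k []).foldl
        (fun acc q => if (PySem.Dict.mk ssl).contains q.1 then
            PySem.Set.update acc ((PySem.Dict.mk ssl).getD q.1 [])
          else acc) PySem.Set.empty
      = l.foldl (fun acc t => if t.1 == k && (PySem.Dict.mk ssl).contains t.2.1 then
            PySem.Set.update acc ((PySem.Dict.mk ssl).getD t.2.1 [])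
          else acc) PySem.Set.empty := by
  rw [PySem.Dict.getD_foldl_modify_append, PySem.Dict.getD_empty, List.nil_append,
      List.foldl_map, List.foldl_filter, pv_foldl_if_if]

theorem merge_sparse_equivalence_classes_py_spec_aux :
    ∀ (histogram : List (List Int × Int)) (sensitive_sets : Option (List (List Int × List Int))) (node : List Int),
      merge_sparse_equivalence_classes_py histogram sensitive_sets node
        = merge_sparse_equivalence_classes_py_alt histogram sensitive_sets node := by
  intro histogram ss node
  unfold merge_sparse_equivalence_classes_py merge_sparse_equivalence_classes_py_alt
  cases ss with
  | none =>
    dsimp only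
    rw [pv_foldl_prod, pv_stepSets_none, pv_foldl_id, pv_hist_items, pv_groups_items]
    simp only [List.map_map, Function.comp_def, List.foldl_map]
    rfl
  | some ssl =>
    dsimp only
    rw [pv_foldl_prod, pv_stepSets_some, pv_foldl_some, pv_hist_items]
    simp only [Option.map_some]
    rw [pv_sets_items, pv_groups_items]
    simp only [pv_sets_value]
    simp only [List.map_map, Function.comp_def, List.foldl_map]

-- ===== VERDICT (by name: the statement is the Claim_ definition above) =====
theorem merge_sparse_equivalence_classes_py_spec : Claim_equal_merge_sparse_equivalence_classes_py := by
  intro histogram ss node _ _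
  exact merge_sparse_equivalence_classes_py_spec_aux histogram ss node
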